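-- pv_equiv track=rewrite | github.com/Moremar/advent_of_code_2021 | day15/script.py | make_big_world
-- ===== SOURCE A (Python) =====
-- def make_big_world(len_x, len_y, world):
--     bigworld = dict(world)
--     for i in range(5):
--         for j in range(5):
--             for key in world:
--                 new_i = key[0] + i * len_x
--                 new_j = key[1] + j * len_y
--                 new_val = world[key] + i + j
--                 if world[key] + i + j >= 10:
--                     new_val -= 9
--                 bigworld[(new_i, new_j)] = new_val
--     return bigworld
-- ===== SOURCE B (Python) =====
-- def make_big_world(len_x, len_y, world):
--     # Build the 5x5 tiling by propagating tiles: each next tile is the previous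
--     # one shifted in place with every raw value bumped by 1; the 10-wraps are
--     # applied once at emission time.
--     def shift(tile, dx, dy):
--         return [((x + dx, y + dy), r + 1) for (x, y), r in tile]
--
--     out = []
--     row = [(key, val) for key, val in world.items()]
--     for _ in range(5):
--         tile = row
--         for _ in range(5):
--             out += [((x, y), r - 9 if r >= 10 else r) for (x, y), r in tile]
--             tile = shift(tile, 0, len_y)
--         row = shift(row, len_x, 0)
--     return dict(out)
-- ===== Notes on version B (the rewrite author's own statement) =====
-- stated objective: alternative
-- what changed: B builds the 5x5 tiling by propagating tiles (each tile is the previous tile shifted in place with every raw value bumped by 1, the 10-wrap applied once at emission) and constructs the dict once from the emitted list, instead of A's per-cell base+i+j offset computation with repeated dict overwrites.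
import Mathlib
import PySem

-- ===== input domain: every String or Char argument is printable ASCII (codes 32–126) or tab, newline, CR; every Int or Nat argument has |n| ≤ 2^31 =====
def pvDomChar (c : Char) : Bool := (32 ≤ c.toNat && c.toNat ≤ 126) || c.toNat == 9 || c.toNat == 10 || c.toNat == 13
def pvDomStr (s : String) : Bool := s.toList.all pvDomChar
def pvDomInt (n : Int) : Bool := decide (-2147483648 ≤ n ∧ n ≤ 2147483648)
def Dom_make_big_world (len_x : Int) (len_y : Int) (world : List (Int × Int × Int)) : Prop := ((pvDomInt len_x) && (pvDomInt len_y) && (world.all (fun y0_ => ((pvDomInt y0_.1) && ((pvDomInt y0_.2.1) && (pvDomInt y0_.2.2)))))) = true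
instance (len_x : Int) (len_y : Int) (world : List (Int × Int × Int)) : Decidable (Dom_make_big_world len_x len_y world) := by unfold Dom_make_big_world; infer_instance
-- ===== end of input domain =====

-- B builds the big world by tile propagation (shift the previous tile, bump each raw
-- value, wrap once at emission) and one final dict construction, instead of A's
-- per-cell base+i+j computation with dict overwrites; objective: alternative.

-- ===== PORT A =====
def make_big_world (len_x : Int) (len_y : Int) (world : List (Int × Int × Int)) : List (Int × Int × Int) :=
  let w : PySem.Dict (Int × Int) Int := PySem.Dict.ofList (world.map (fun t => ((t.1, t.2.1), t.2.2)))
  let bigworld : PySem.Dict (Int × Int) Int :=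
    (PySem.List.pyRange 0 5 1).foldl (fun big i =>
      (PySem.List.pyRange 0 5 1).foldl (fun big j =>
        w.keys.foldl (fun big key =>
          let new_i := key.1 + i * len_x
          let new_j := key.2 + j * len_y
          let new_val := w.getD key 0 + i + j
          let new_val := if w.getD key 0 + i + j ≥ 10 then new_val - 9 else new_val
          big.insert (new_i, new_j) new_val) big) big) w
  bigworld.items.map (fun p => (p.1.1, p.1.2, p.2))

-- ===== PORT B =====
def shiftTile (tile : List ((Int × Int) × Int)) (dx : Int) (dy : Int) : List ((Int × Int) × Int) :=
  tile.map (fun p => ((p.1.1 + dx, p.1.2 + dy), p.2 + 1))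

def make_big_world_alt (len_x : Int) (len_y : Int) (world : List (Int × Int × Int)) : List (Int × Int × Int) :=
  let row0 : List ((Int × Int) × Int) :=
    (PySem.Dict.ofList (world.map (fun t => ((t.1, t.2.1), t.2.2)))).items
  let res : List ((Int × Int) × Int) × List ((Int × Int) × Int) :=
    (PySem.List.pyRange 0 5 1).foldl (fun st _ =>
      let inner : List ((Int × Int) × Int) × List ((Int × Int) × Int) :=
        (PySem.List.pyRange 0 5 1).foldl (fun st2 _ =>
          (st2.1 ++ st2.2.map (fun p => (p.1, if p.2 ≥ 10 then p.2 - 9 else p.2)),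
           shiftTile st2.2 0 len_y)) (st.1, st.2)
      (inner.1, shiftTile st.2 len_x 0)) ([], row0)
  (PySem.Dict.ofList res.1).items.map (fun p => (p.1.1, p.1.2, p.2))

-- ===== PRECONDITION & SPEC =====
def Spec_make_big_world (len_x : Int) (len_y : Int) (world : List (Int × Int × Int)) (out : List (Int × Int × Int)) : Prop := out = make_big_world_alt len_x len_y world
instance (len_x : Int) (len_y : Int) (world : List (Int × Int × Int)) (out : List (Int × Int × Int)) : Decidable (Spec_make_big_world len_x len_y world out) := by unfold Spec_make_big_world; infer_instance

-- ===== CLAIM (what is proved, stated in full; the proofs are below) =====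
def Claim_equal_make_big_world : Prop := ∀ (len_x : Int) (len_y : Int) (world : List (Int × Int × Int)), Dom_make_big_world len_x len_y world → Spec_make_big_world len_x len_y world (make_big_world len_x len_y world)

-- ===== LEMMAS AND PROOFS =====

-- fold of inserts over a list of pairs
def insFold (d : PySem.Dict (Int × Int) Int) (l : List ((Int × Int) × Int)) : PySem.Dict (Int × Int) Int :=
  l.foldl (fun b p => b.insert p.1 p.2) d

-- the raw (un-wrapped) tile of offsets (i, j), and the emitted (wrapped) tile
def rawT (lx ly : Int) (d : PySem.Dict (Int × Int) Int) (i j : Int) : List ((Int × Int) × Int) :=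
  d.keys.map (fun k => ((k.1 + i * lx, k.2 + j * ly), d.getD k 0 + i + j))

def emitL (l : List ((Int × Int) × Int)) : List ((Int × Int) × Int) :=
  l.map (fun p => (p.1, if p.2 ≥ 10 then p.2 - 9 else p.2))

theorem insFold_append (d : PySem.Dict (Int × Int) Int) (l1 l2 : List ((Int × Int) × Int)) :
    insFold d (l1 ++ l2) = insFold (insFold d l1) l2 := by
  simp [insFold]

theorem insert_mk_cons (k : Int × Int) (w : Int) (t : List ((Int × Int) × Int))
    (k' : Int × Int) (v : Int) (h : k' ≠ k) :
    (PySem.Dict.mk ((k, w) :: t)).insert k' v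
      = PySem.Dict.mk ((k, w) :: ((PySem.Dict.mk t).insert k' v).items) := by
  apply PySem.Dict.ext
  have hkk : (k == k') = false := by simpa using (Ne.symm h)
  simp only [PySem.Dict.insert, PySem.Dict.contains, List.any_cons, hkk, Bool.false_or]
  split_ifs <;> simp [Ne.symm h]

theorem insFold_mk_cons (l : List ((Int × Int) × Int)) (k : Int × Int) (w : Int)
    (t : List ((Int × Int) × Int)) (h : ∀ p ∈ l, p.1 ≠ k) :
    insFold (PySem.Dict.mk ((k, w) :: t)) l
      = PySem.Dict.mk ((k, w) :: (insFold (PySem.Dict.mk t) l).items) := by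
  induction l generalizing t with
  | nil => simp [insFold]
  | cons p l ih =>
    simp only [insFold, List.foldl_cons]
    rw [insert_mk_cons _ _ _ _ _ (h p (by simp))]
    exact ih _ (fun q hq => h q (by simp [hq]))

-- overwriting every key of d, in key order, replaces the items wholesale
theorem insFold_overwrite (t0 : List ((Int × Int) × Int)) (d : PySem.Dict (Int × Int) Int)
    (hk : t0.map (·.1) = d.keys) (hnd : d.keys.Nodup) :
    insFold d t0 = PySem.Dict.mk t0 := by
  induction t0 generalizing d with
  | nil =>
    have : d.items = [] := by simpa [PySem.Dict.keys] using hk.symm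
    apply PySem.Dict.ext
    simpa [insFold] using this
  | cons p t0' ih =>
    obtain ⟨k, w⟩ := p
    cases hd : d.items with
    | nil => simp [PySem.Dict.keys, hd] at hk
    | cons q rest =>
      obtain ⟨k0, v0⟩ := q
      have hkeys : d.keys = k0 :: rest.map (·.1) := by simp [PySem.Dict.keys, hd]
      have hk0 : k = k0 ∧ t0'.map (·.1) = rest.map (·.1) := by
        rw [hkeys] at hk; simpa using hk
      have hnd' : (rest.map (·.1)).Nodup := by rw [hkeys] at hnd; exact hnd.of_cons
      have hknotin : k ∉ rest.map (·.1) := by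
        rw [hkeys] at hnd; rw [hk0.1]; exact (List.nodup_cons.mp hnd).1
      have hins : d.insert k w = PySem.Dict.mk ((k, w) :: rest) := by
        apply PySem.Dict.ext
        have hcont : d.contains k = true := by
          simp [PySem.Dict.contains, hd, hk0.1]
        rw [PySem.Dict.items_insert_of_contains d w hcont, hd]
        simp only [List.map_cons]
        rw [hk0.1]
        simp only [beq_self_eq_true, if_pos]
        congr 1
        apply (List.map_congr_left _).trans (List.map_id _)
        intro a ha
        have hne : a.1 ≠ k0 := by
          intro hh
          exact (hk0.1 ▸ hknotin) (hh ▸ List.mem_map_of_mem ha)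
        simp [hne]
      simp only [insFold, List.foldl_cons, hins]
      have := insFold_mk_cons t0' k w rest (fun q hq => by
        intro hh
        exact hknotin (hk0.2 ▸ (hh ▸ List.mem_map_of_mem hq)))
      simp only [insFold] at this ih
      rw [this, ih (PySem.Dict.mk rest) (by simpa [PySem.Dict.keys] using hk0.2)
            (by simpa [PySem.Dict.keys] using hnd')]

-- a fold of inserts from empty over nodup keys is the literal dict
theorem insFold_empty_nodup (l : List ((Int × Int) × Int)) (hnd : (l.map (·.1)).Nodup) :
    insFold PySem.Dict.empty l = PySem.Dict.mk l := by
  apply PySem.Dict.ext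
  have := PySem.Dict.items_foldl_insert_fresh l (·.1) (·.2) PySem.Dict.empty
    (by intro a _; simp [PySem.Dict.contains, PySem.Dict.empty]) hnd
  simpa [insFold, PySem.Dict.empty] using this

-- the base items are the raw tile (0, 0)
theorem items_eq_rawT (lx ly : Int) (d : PySem.Dict (Int × Int) Int) (hnd : d.keys.Nodup) :
    d.items = rawT lx ly d 0 0 := by
  rw [PySem.Dict.items_eq_map_keys d hnd 0]
  simp only [rawT]
  apply List.map_congr_left
  intro k _
  simp

-- shifting a raw tile right / down gives the next raw tile
theorem shiftTile_rawT_x (lx ly : Int) (d : PySem.Dict (Int × Int) Int) (i j : Int) :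
    shiftTile (rawT lx ly d i j) lx 0 = rawT lx ly d (i + 1) j := by
  simp only [shiftTile, rawT, List.map_map]
  apply List.map_congr_left
  intro k _
  simp only [Function.comp]
  refine Prod.ext (Prod.ext ?_ ?_) ?_ <;> simp <;> ring

theorem shiftTile_rawT_y (lx ly : Int) (d : PySem.Dict (Int × Int) Int) (i j : Int) :
    shiftTile (rawT lx ly d i j) 0 ly = rawT lx ly d i (j + 1) := by
  simp only [shiftTile, rawT, List.map_map]
  apply List.map_congr_left
  intro k _
  simp only [Function.comp]
  refine Prod.ext (Prod.ext ?_ ?_) ?_ <;> simp <;> ring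

-- A's inner write loop is an insFold of the emitted tile
theorem write_loop_eq (lx ly : Int) (d : PySem.Dict (Int × Int) Int) (i j : Int)
    (b : PySem.Dict (Int × Int) Int) :
    d.keys.foldl (fun big key =>
        big.insert (key.1 + i * lx, key.2 + j * ly)
          (if d.getD key 0 + i + j ≥ 10 then d.getD key 0 + i + j - 9
           else d.getD key 0 + i + j)) b
      = insFold b (emitL (rawT lx ly d i j)) := by
  simp [insFold, emitL, rawT, List.map_map, List.foldl_map]

-- the first emitted tile overwrites the base dict completely: starting from d
-- or from the empty dict gives the same result
theorem first_tile_eq (lx ly : Int) (d : PySem.Dict (Int × Int) Int) (hnd : d.keys.Nodup) :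
    insFold d (emitL (rawT lx ly d 0 0)) = insFold PySem.Dict.empty (emitL (rawT lx ly d 0 0)) := by
  have hfst : (emitL (rawT lx ly d 0 0)).map (·.1) = d.keys := by
    simp only [emitL, rawT, List.map_map]
    apply (List.map_congr_left _).trans (List.map_id _)
    intro k _
    simp
  rw [insFold_overwrite _ _ hfst hnd, insFold_empty_nodup _ (by rw [hfst]; exact hnd)]

-- ===== VERDICT (by name: the statement is the Claim_ definition above) =====
theorem make_big_world_spec : Claim_equal_make_big_world := by
  intro len_x len_y world _
  unfold Spec_make_big_world make_big_world make_big_world_alt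
  set d : PySem.Dict (Int × Int) Int :=
    PySem.Dict.ofList (world.map (fun t => ((t.1, t.2.1), t.2.2))) with hd
  have hnd : d.keys.Nodup := PySem.Dict.nodup_keys_ofList _
  simp only [show PySem.List.pyRange 0 5 1 = [0,1,2,3,4] from rfl,
    List.foldl_cons, List.foldl_nil]
  simp only [write_loop_eq len_x len_y d]
  rw [items_eq_rawT len_x len_y d hnd]
  simp only [shiftTile_rawT_x, shiftTile_rawT_y]
  norm_num
  rw [show (PySem.Dict.ofList : List ((Int × Int) × Int) → PySem.Dict (Int × Int) Int)
        = insFold PySem.Dict.empty from rfl]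
  simp only [insFold_append]
  rw [first_tile_eq len_x len_y d hnd]
  simp only [emitL, ge_iff_le]
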